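-- pv_equiv track=rewrite | github.com/vattvar/Causal-Narratives | 100_CausalPairs/preprocess_utils.py | tag_arg
-- ===== SOURCE A (Python) =====
-- from itertools import product
--
-- def tag_arg(seq, tag_idx):
--     """ Add argument tags i.e. <ARG></ARG> to text.
--
--         seq is a string containing the orginal text without pairs.
--         tag_idx is a tuple containing two lists of tuples.
--
--         return a string conataining argtags"""
--
--     c_list = tag_idx[0]
--     e_list = tag_idx[1]
--     seq_list = seq.split()
--     text_w_pair_list = [] # master list
--
--     pairs = list(product(c_list,e_list))
--     for pair in pairs:
--         seq_w_pair_list = [] # inner list for each pair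
--         c_idx_begin = pair[0][0]
--         c_idx_end = pair[0][1]
--         e_idx_begin = pair[1][0]
--         e_idx_end = pair[1][1]
--         for i in range(len(seq_list)):
--             term = seq_list[i]
--             if i == c_idx_begin:
--                 term = "<ARG0>" + term
--             if i == c_idx_end:
--                 term = term + "</ARG0>"
--             if i == e_idx_begin:
--                 term = "<ARG1>" + term
--             if i == e_idx_end:
--                 term = term + "</ARG1>"
--             seq_w_pair_list.append(term)
--         text_w_pair_list.append(" ".join(seq_w_pair_list))
--
--     return text_w_pair_list
-- ===== SOURCE B (Python) =====
-- def tag_arg(seq, tag_idx):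
--     """Different algorithm: precompute character offsets of each word in the
--     normalized text once; per pair, sort (at most four) tag insertion points
--     and splice the tags into the base string by slicing, instead of rebuilding
--     the row word by word."""
--     words = seq.split()
--     base = " ".join(words)
--     starts = []
--     pos = 0
--     for w in words:
--         starts.append(pos)
--         pos += len(w) + 1
--     ends = [s + len(w) for s, w in zip(starts, words)]
--     n = len(words)
--     out = []
--     for cb, ce in tag_idx[0]:
--         for eb, ee in tag_idx[1]:
--             ins = []
--             if 0 <= eb < n:
--                 ins.append((starts[eb], 0, "<ARG1>"))
--             if 0 <= cb < n:
--                 ins.append((starts[cb], 1, "<ARG0>"))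
--             if 0 <= ce < n:
--                 ins.append((ends[ce], 2, "</ARG0>"))
--             if 0 <= ee < n:
--                 ins.append((ends[ee], 3, "</ARG1>"))
--             ins.sort(key=lambda t: 4 * t[0] + t[1])
--             parts = []
--             prev = 0
--             for p, _, tag in ins:
--                 parts.append(base[prev:p])
--                 parts.append(tag)
--                 prev = p
--             parts.append(base[prev:])
--             out.append("".join(parts))
--     return out
-- ===== Notes on version B (the rewrite author's own statement) =====
-- stated objective: alternative
-- what changed: A rebuilds every row word by word, comparing each word index against the four tag indices; B instead precomputes the character offsets of each word in the normalized text once, and per (cause,effect) pair sorts at most four tag insertion points and splices the tags into the base string by slicing.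
import Mathlib
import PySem

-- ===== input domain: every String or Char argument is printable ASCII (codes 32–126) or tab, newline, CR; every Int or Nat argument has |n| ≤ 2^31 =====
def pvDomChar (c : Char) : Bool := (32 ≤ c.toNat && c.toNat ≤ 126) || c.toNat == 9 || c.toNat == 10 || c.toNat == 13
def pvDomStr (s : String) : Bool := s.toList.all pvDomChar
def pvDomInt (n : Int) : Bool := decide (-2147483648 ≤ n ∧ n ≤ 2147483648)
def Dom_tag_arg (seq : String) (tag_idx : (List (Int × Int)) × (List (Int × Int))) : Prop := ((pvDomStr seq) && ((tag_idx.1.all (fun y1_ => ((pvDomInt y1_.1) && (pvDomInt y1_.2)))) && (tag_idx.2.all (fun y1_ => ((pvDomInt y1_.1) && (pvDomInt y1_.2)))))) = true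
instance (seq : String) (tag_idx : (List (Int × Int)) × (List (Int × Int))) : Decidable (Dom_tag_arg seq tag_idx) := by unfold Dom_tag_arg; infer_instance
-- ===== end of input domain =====

-- B replaces A's per-word 4-comparison scan per pair by precomputed character offsets:
-- per pair it sorts at most four tag insertion points and splices them into the base
-- string (alternative algorithm, same asymptotic cost).

-- ===== PORT A =====
def tag_arg (seq : String) (tag_idx : (List (Int × Int)) × (List (Int × Int))) : List String :=
  let c_list := tag_idx.1
  let e_list := tag_idx.2
  let seq_list := PySem.Str.split₀ seq
  let pairs := c_list.flatMap (fun c => e_list.map (fun e => (c, e)))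
  pairs.foldl (fun text_w_pair_list pair =>
    let c_idx_begin := pair.1.1
    let c_idx_end := pair.1.2
    let e_idx_begin := pair.2.1
    let e_idx_end := pair.2.2
    let seq_w_pair_list := (List.range seq_list.length).foldl (fun inner i =>
      let term := seq_list.getD i ""        -- seq_list[i]; i < len so the default is never used
      let term := if (i : Int) = c_idx_begin then "<ARG0>" ++ term else term
      let term := if (i : Int) = c_idx_end then term ++ "</ARG0>" else term
      let term := if (i : Int) = e_idx_begin then "<ARG1>" ++ term else term
      let term := if (i : Int) = e_idx_end then term ++ "</ARG1>" else term
      inner ++ [term]) []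
    text_w_pair_list ++ [PySem.Str.join " " seq_w_pair_list]) []

-- ===== PORT B =====
def tag_arg_alt (seq : String) (tag_idx : (List (Int × Int)) × (List (Int × Int))) : List String :=
  let words := PySem.Str.split₀ seq
  let base := PySem.Str.join " " words
  -- the `for w in words: starts.append(pos); pos += len(w)+1` loop
  let sp := words.foldl (fun (st : List Int × Int) w => (st.1 ++ [st.2], st.2 + PySem.Str.len w + 1)) ([], 0)
  let starts := sp.1
  let ends := (starts.zip words).map (fun p => p.1 + PySem.Str.len p.2)
  let n := PySem.List.len words
  tag_idx.1.flatMap (fun c => tag_idx.2.map (fun e =>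
    -- the four guarded appends building `ins`; starts[idx]/ends[idx] are guarded by
    -- 0 <= idx < n, so pyGetD's default is never used
    let ins : List (Int × Int × String) :=
      (if 0 ≤ e.1 ∧ e.1 < n then [(PySem.List.pyGetD starts e.1 0, 0, "<ARG1>")] else [])
      ++ (if 0 ≤ c.1 ∧ c.1 < n then [(PySem.List.pyGetD starts c.1 0, 1, "<ARG0>")] else [])
      ++ (if 0 ≤ c.2 ∧ c.2 < n then [(PySem.List.pyGetD ends c.2 0, 2, "</ARG0>")] else [])
      ++ (if 0 ≤ e.2 ∧ e.2 < n then [(PySem.List.pyGetD ends e.2 0, 3, "</ARG1>")] else [])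
    let ins := PySem.List.sorted ins (fun t => 4 * t.1 + t.2.1)
    -- the `for p, _, tag in ins` splice loop with accumulator (parts, prev)
    let fin := ins.foldl (fun (st : List String × Int) t =>
      (st.1 ++ [PySem.Str.slice base (some st.2) (some t.1), t.2.2], t.1)) ([], 0)
    PySem.Str.join "" (fin.1 ++ [PySem.Str.slice base (some fin.2) none])))

-- ===== PRECONDITION & SPEC =====
def Spec_tag_arg (seq : String) (tag_idx : (List (Int × Int)) × (List (Int × Int))) (out : List String) : Prop := out = tag_arg_alt seq tag_idx
instance (seq : String) (tag_idx : (List (Int × Int)) × (List (Int × Int))) (out : List String) : Decidable (Spec_tag_arg seq tag_idx out) := by unfold Spec_tag_arg; infer_instance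

-- ===== CLAIM (what is proved, stated in full; the proofs are below) =====
def Claim_equal_tag_arg : Prop := ∀ (seq : String) (tag_idx : (List (Int × Int)) × (List (Int × Int))), Dom_tag_arg seq tag_idx → Spec_tag_arg seq tag_idx (tag_arg seq tag_idx)

-- ===== LEMMAS AND PROOFS =====

-- the common canonical form of one tagged row, on the char-list level
def preC (cb eb i : Int) : List Char :=
  (if i = eb then "<ARG1>".toList else []) ++ (if i = cb then "<ARG0>".toList else [])

def sufC (ce ee i : Int) : List Char :=
  (if i = ce then "</ARG0>".toList else []) ++ (if i = ee then "</ARG1>".toList else [])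

def canonF : List (List Char) → Int → Int → Int → Int → List Char
  | [], _, _, _, _ => []
  | w :: ws, cb, ce, eb, ee =>
    preC cb eb 0 ++ w ++ sufC ce ee 0 ++
      (match ws with
       | [] => []
       | _ :: _ => ' ' :: canonF ws (cb - 1) (ce - 1) (eb - 1) (ee - 1))

-- word start / end character offsets
def startsL : List (List Char) → Int → List Int
  | [], _ => []
  | w :: ws, off => off :: startsL ws (off + w.length + 1)

def endsL : List (List Char) → Int → List Int
  | [], _ => []
  | w :: ws, off => (off + w.length) :: endsL ws (off + w.length + 1)

-- the sorted insertion list, grouped word by word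
def gIns : List (List Char) → Int → Int → Int → Int → Int → List (Int × Int × String)
  | [], _, _, _, _, _ => []
  | w :: ws, off, cb, ce, eb, ee =>
    (if eb = 0 then [(off, 0, "<ARG1>")] else [])
    ++ (if cb = 0 then [(off, 1, "<ARG0>")] else [])
    ++ (if ce = 0 then [(off + w.length, 2, "</ARG0>")] else [])
    ++ (if ee = 0 then [(off + w.length, 3, "</ARG1>")] else [])
    ++ gIns ws (off + w.length + 1) (cb - 1) (ce - 1) (eb - 1) (ee - 1)

def conv (t : Int × Int × String) : Int × Int × List Char := (t.1, t.2.1, t.2.2.toList)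

-- splice with positions relative to the current remainder of the base
def rsplice : List Char → List (Int × Int × List Char) → List Char
  | base, [] => base
  | base, (p, _, t) :: L =>
    base.take p.toNat ++ t ++ rsplice (base.drop p.toNat) (L.map (fun e => (e.1 - p, e.2)))
  termination_by _ L => L.length
  decreasing_by simp

-- splice with absolute positions and a `prev` cursor, as in the port's fold
def fsplice (base : List Char) : Int → List (Int × Int × List Char) → List Char
  | prev, [] => PySem.List.slice base (some prev) none
  | prev, (p, _, t) :: L => PySem.List.slice base (some prev) (some p) ++ t ++ fsplice base p L

-- join with empty separator is flatten
theorem join_empty_flatten (ps : List (List Char)) : PySem.Chars.join [] ps = ps.flatten := by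
  induction ps with
  | nil => simp [PySem.Chars.join_nil]
  | cons a l ih =>
    cases l with
    | nil => simp [PySem.Chars.join_singleton]
    | cons b m => simp [PySem.Chars.join_cons_cons] at *; simp [ih]

theorem getD_map_str (l : List String) (i : Nat) :
    (l.getD i "").toList = (l.map String.toList).getD i [] := by
  simp only [List.getD_eq_getElem?_getD, List.getElem?_map]
  cases h : l[i]? with
  | none => simp
  | some v => simp

theorem preC_shift (cb eb : Int) (i : Nat) :
    preC cb eb ((i : Int) + 1) = preC (cb - 1) (eb - 1) i := by
  unfold preC
  rw [if_congr (show ((i:Int)+1 = eb) ↔ ((i:Int) = eb - 1) by omega) rfl rfl,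
      if_congr (show ((i:Int)+1 = cb) ↔ ((i:Int) = cb - 1) by omega) rfl rfl]

theorem sufC_shift (ce ee : Int) (i : Nat) :
    sufC ce ee ((i : Int) + 1) = sufC (ce - 1) (ee - 1) i := by
  unfold sufC
  rw [if_congr (show ((i:Int)+1 = ce) ↔ ((i:Int) = ce - 1) by omega) rfl rfl,
      if_congr (show ((i:Int)+1 = ee) ↔ ((i:Int) = ee - 1) by omega) rfl rfl]

-- A's per-word nested-if term, reordered into prefix ++ word ++ suffix form
theorem termA_toList (w : String) (cb ce eb ee i : Int) :
    (let term := w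
     let term := if i = cb then "<ARG0>" ++ term else term
     let term := if i = ce then term ++ "</ARG0>" else term
     let term := if i = eb then "<ARG1>" ++ term else term
     let term := if i = ee then term ++ "</ARG1>" else term
     term).toList = preC cb eb i ++ w.toList ++ sufC ce ee i := by
  simp only [preC, sufC]
  split_ifs <;> simp [String.toList_append]

-- the list of canonical per-word rows
def rowL : List (List Char) → Int → Int → Int → Int → List (List Char)
  | [], _, _, _, _ => []
  | w :: ws, cb, ce, eb, ee =>
    (preC cb eb 0 ++ w ++ sufC ce ee 0) :: rowL ws (cb - 1) (ce - 1) (eb - 1) (ee - 1)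

theorem rowL_eq (ws : List (List Char)) (cb ce eb ee : Int) :
    (List.range ws.length).map (fun (i : Nat) => preC cb eb (i : Int) ++ ws.getD i [] ++ sufC ce ee (i : Int))
    = rowL ws cb ce eb ee := by
  induction ws generalizing cb ce eb ee with
  | nil => simp [rowL]
  | cons w ws ih =>
    simp only [List.length_cons, List.range_succ_eq_map, List.map_cons, List.map_map, rowL]
    refine congrArg₂ _ (by norm_num) ?_
    rw [← ih (cb-1) (ce-1) (eb-1) (ee-1)]
    refine List.map_congr_left (fun i _ => ?_)
    have h1 : ((i + 1 : Nat) : Int) = (i : Int) + 1 := by push_cast; ring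
    simp only [Function.comp, List.getD_cons_succ, h1, preC_shift, sufC_shift]

theorem joinCanon (ws : List (List Char)) (cb ce eb ee : Int) :
    PySem.Chars.join [' '] (rowL ws cb ce eb ee) = canonF ws cb ce eb ee := by
  induction ws generalizing cb ce eb ee with
  | nil => simp [rowL, canonF, PySem.Chars.join_nil]
  | cons w ws ih =>
    cases ws with
    | nil => simp [rowL, canonF, PySem.Chars.join_singleton]
    | cons b m =>
      show PySem.Chars.join [' '] (_ :: rowL (b :: m) _ _ _ _) = _
      have h2 : rowL (b :: m) (cb-1) (ce-1) (eb-1) (ee-1)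
          = (preC (cb-1) (eb-1) 0 ++ b ++ sufC (ce-1) (ee-1) 0)
            :: rowL m (cb-1-1) (ce-1-1) (eb-1-1) (ee-1-1) := rfl
      rw [h2, PySem.Chars.join_cons_cons, ← h2, ih]
      show _ = preC cb eb 0 ++ w ++ sufC ce ee 0 ++ (' ' :: canonF (b :: m) (cb-1) (ce-1) (eb-1) (ee-1))
      simp

-- the port's starts-building fold computes startsL
theorem starts_foldl (words : List String) (acc : List Int) (pos : Int) :
    (words.foldl (fun (st : List Int × Int) w => (st.1 ++ [st.2], st.2 + PySem.Str.len w + 1)) (acc, pos)).1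
    = acc ++ startsL (words.map String.toList) pos := by
  induction words generalizing acc pos with
  | nil => simp [startsL]
  | cons w ws ih =>
    simp only [List.foldl_cons]
    rw [ih]
    simp [startsL, PySem.Str.len_eq]

theorem ends_zip (words : List String) (pos : Int) :
    ((startsL (words.map String.toList) pos).zip words).map (fun p => p.1 + PySem.Str.len p.2)
    = endsL (words.map String.toList) pos := by
  induction words generalizing pos with
  | nil => simp [startsL, endsL]
  | cons w ws ih =>
    simp only [List.map_cons, startsL, List.zip_cons_cons, List.map_cons, endsL]
    exact congrArg₂ _ (by simp [PySem.Str.len_eq]) (ih _)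

theorem startsL_length (ws : List (List Char)) (off : Int) : (startsL ws off).length = ws.length := by
  induction ws generalizing off with
  | nil => rfl
  | cons w ws ih => simp [startsL, ih]

theorem endsL_length (ws : List (List Char)) (off : Int) : (endsL ws off).length = ws.length := by
  induction ws generalizing off with
  | nil => rfl
  | cons w ws ih => simp [endsL, ih]

-- multiset shuffle of eight blocks
theorem perm_shuffle (a b c d p q r s : List (Int × Int × String)) :
    (a ++ b ++ c ++ d ++ (p ++ q ++ r ++ s)).Perm ((a ++ p) ++ (b ++ q) ++ (c ++ r) ++ (d ++ s)) := by
  refine List.perm_iff_count.2 (fun x => ?_)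
  simp [List.count_append]
  ring

-- gIns is a permutation of the port's four guarded insertions
theorem gIns_perm (ws : List (List Char)) (off cb ce eb ee : Int) :
    (gIns ws off cb ce eb ee).Perm
      ((if 0 ≤ eb ∧ eb < (ws.length : Int) then [(PySem.List.pyGetD (startsL ws off) eb 0, 0, "<ARG1>")] else [])
       ++ (if 0 ≤ cb ∧ cb < (ws.length : Int) then [(PySem.List.pyGetD (startsL ws off) cb 0, 1, "<ARG0>")] else [])
       ++ (if 0 ≤ ce ∧ ce < (ws.length : Int) then [(PySem.List.pyGetD (endsL ws off) ce 0, 2, "</ARG0>")] else [])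
       ++ (if 0 ≤ ee ∧ ee < (ws.length : Int) then [(PySem.List.pyGetD (endsL ws off) ee 0, 3, "</ARG1>")] else [])) := by
  induction ws generalizing off cb ce eb ee with
  | nil =>
    simp only [gIns, List.length_nil, Nat.cast_zero]
    have : ∀ (idx : Int), ¬ (0 ≤ idx ∧ idx < (0 : Int)) := by omega
    simp [this]
  | cons w ws ih =>
    have ihh := ih (off + (w.length : Int) + 1) (cb - 1) (ce - 1) (eb - 1) (ee - 1)
    have hlen : (((w :: ws).length : Nat) : Int) = (ws.length : Int) + 1 := by simp
    have hsucc : ∀ (l : List Int) (x idx : Int), 0 ≤ idx - 1 → idx - 1 < (l.length : Int) →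
        PySem.List.pyGetD (x :: l) idx 0 = PySem.List.pyGetD l (idx - 1) 0 := by
      intro l x idx h1 h2
      rw [PySem.List.pyGetD_eq_getElem _ _ (by omega) (by simp; omega),
          PySem.List.pyGetD_eq_getElem _ _ h1 h2]
      have hk : idx.toNat = (idx - 1).toNat + 1 := by omega
      simp only [hk, List.getElem_cons_succ]
    have hC : ∀ (idx r : Int) (tg : String),
        (if 0 ≤ idx ∧ idx < (((w :: ws).length : Nat) : Int)
           then [(PySem.List.pyGetD (startsL ((w :: ws) : List (List Char)) off) idx 0, r, tg)] else [])
        = (if idx = 0 then [(off, r, tg)] else [])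
          ++ (if 0 ≤ idx - 1 ∧ idx - 1 < ((ws.length : Nat) : Int)
                then [(PySem.List.pyGetD (startsL ws (off + (w.length : Int) + 1)) (idx - 1) 0, r, tg)] else []) := by
      intro idx r tg
      by_cases h0 : idx = 0
      · subst h0
        rw [if_pos (by omega), if_pos rfl, if_neg (by omega)]
        simp [startsL, PySem.List.pyGetD_zero_cons]
      · by_cases h1 : 0 ≤ idx - 1 ∧ idx - 1 < ((ws.length : Nat) : Int)
        · rw [if_pos (by omega), if_neg h0, if_pos h1]
          have := hsucc (startsL ws (off + (w.length : Int) + 1)) off idx h1.1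
            (by rw [startsL_length]; exact h1.2)
          simp only [startsL] at this ⊢
          rw [this]
          simp
        · rw [if_neg (by omega), if_neg h0, if_neg h1]
          simp
    have hE : ∀ (idx r : Int) (tg : String),
        (if 0 ≤ idx ∧ idx < (((w :: ws).length : Nat) : Int)
           then [(PySem.List.pyGetD (endsL ((w :: ws) : List (List Char)) off) idx 0, r, tg)] else [])
        = (if idx = 0 then [(off + (w.length : Int), r, tg)] else [])
          ++ (if 0 ≤ idx - 1 ∧ idx - 1 < ((ws.length : Nat) : Int)
                then [(PySem.List.pyGetD (endsL ws (off + (w.length : Int) + 1)) (idx - 1) 0, r, tg)] else []) := by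
      intro idx r tg
      by_cases h0 : idx = 0
      · subst h0
        rw [if_pos (by omega), if_pos rfl, if_neg (by omega)]
        simp [endsL, PySem.List.pyGetD_zero_cons]
      · by_cases h1 : 0 ≤ idx - 1 ∧ idx - 1 < ((ws.length : Nat) : Int)
        · rw [if_pos (by omega), if_neg h0, if_pos h1]
          have := hsucc (endsL ws (off + (w.length : Int) + 1)) (off + (w.length : Int)) idx h1.1
            (by rw [endsL_length]; exact h1.2)
          simp only [endsL] at this ⊢
          rw [this]
          simp
        · rw [if_neg (by omega), if_neg h0, if_neg h1]
          simp
    rw [hC eb 0 "<ARG1>", hC cb 1 "<ARG0>", hE ce 2 "</ARG0>", hE ee 3 "</ARG1>"]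
    show (gIns (w :: ws) off cb ce eb ee).Perm _
    simp only [gIns]
    exact (List.Perm.append_left _ ihh).trans (perm_shuffle _ _ _ _ _ _ _ _)

-- offsets and ranks of gIns entries are bounded
theorem gIns_bound (ws : List (List Char)) (off cb ce eb ee : Int) :
    ∀ t ∈ gIns ws off cb ce eb ee, off ≤ t.1 ∧ 0 ≤ t.2.1 ∧ t.2.1 ≤ 3 := by
  induction ws generalizing off cb ce eb ee with
  | nil => simp [gIns]
  | cons w ws ih =>
    intro t ht
    simp only [gIns, List.mem_append] at ht
    rcases ht with ((((h | h) | h) | h) | h)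
    all_goals first
      | (split at h <;> simp_all)
      | (have := ih (off + (w.length : Int) + 1) (cb-1) (ce-1) (eb-1) (ee-1) t h; omega)

-- gIns is strictly sorted by the packed key, and nondecreasing in position
theorem gIns_pairwise (ws : List (List Char)) (off cb ce eb ee : Int) :
    (gIns ws off cb ce eb ee).Pairwise
      (fun a b => a.1 ≤ b.1 ∧ 4 * a.1 + a.2.1 < 4 * b.1 + b.2.1) := by
  induction ws generalizing off cb ce eb ee with
  | nil => simp [gIns]
  | cons w ws ih =>
    have hb := gIns_bound ws (off + (w.length : Int) + 1) (cb - 1) (ce - 1) (eb - 1) (ee - 1)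
    have ht := ih (off + (w.length : Int) + 1) (cb - 1) (ce - 1) (eb - 1) (ee - 1)
    have hw : (0 : Int) ≤ (w.length : Int) := by positivity
    simp only [gIns]
    split_ifs <;>
      simp [List.pairwise_cons, ht] <;>
      (repeat' apply And.intro) <;>
      first
        | omega
        | (intro a r s hm
           have := hb (a, r, s) hm
           simp at this
           omega)

-- gIns at offset off is gIns at offset 0 shifted
theorem gIns_shift (ws : List (List Char)) (off d cb ce eb ee : Int) :
    gIns ws (off + d) cb ce eb ee = (gIns ws off cb ce eb ee).map (fun e => (e.1 + d, e.2)) := by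
  induction ws generalizing off d cb ce eb ee with
  | nil => simp [gIns]
  | cons w ws ih =>
    have harg : off + d + (w.length : Int) + 1 = (off + (w.length : Int) + 1) + d := by ring
    simp only [gIns, List.map_append,
      apply_ite (List.map (fun (e : Int × Int × String) => (e.1 + d, e.2))),
      List.map_cons, List.map_nil]
    rw [harg, ih]
    refine congrArg₂ _ ?_ (congrArg₂ _ ?_ (congrArg₂ _ ?_ (congrArg₂ _ ?_ rfl))) <;>
      first
        | rfl
        | (split_ifs <;> simp <;> omega)

-- rsplice laws
theorem rsplice_nil (base : List Char) : rsplice base [] = base := by simp [rsplice]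

theorem rsplice_zero (base : List Char) (r : Int) (t : List Char) (L : List (Int × Int × List Char)) :
    rsplice base ((0, r, t) :: L) = t ++ rsplice base L := by
  simp [rsplice]

theorem rsplice_append (x cs : List Char) (L : List (Int × Int × List Char))
    (hL : ∀ e ∈ L, 0 ≤ e.1) :
    rsplice (x ++ cs) (L.map (fun e => (e.1 + (x.length : Int), e.2))) = x ++ rsplice cs L := by
  cases L with
  | nil => simp [rsplice]
  | cons e L =>
    obtain ⟨p, r, t⟩ := e
    have hp : 0 ≤ p := hL (p, r, t) (by simp)
    have h1 : (p + (x.length : Int)).toNat = x.length + p.toNat := by omega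
    have h3 : (L.map (fun (e : Int × Int × List Char) => (e.1 + (x.length : Int), e.2))).map
        (fun e => (e.1 - (p + (x.length : Int)), e.2)) = L.map (fun e => (e.1 - p, e.2)) := by
      rw [List.map_map]
      refine List.map_congr_left (fun e _ => by simp [Function.comp]; try ring)
    simp only [List.map_cons, rsplice, h1, h3, List.take_append, List.drop_append]
    have h2 : x.length + p.toNat - x.length = p.toNat := by omega
    rw [h2, List.take_of_length_le (le_add_right le_rfl),
        List.drop_eq_nil_of_le (le_add_right le_rfl)]
    simp

-- join with "" is flatten, on the string level
theorem join_str_flatten (ps : List String) :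
    (PySem.Str.join "" ps).toList = (ps.map String.toList).flatten := by
  rw [PySem.Str.toList_join]
  show PySem.Chars.join [] _ = _
  rw [join_empty_flatten]

-- the port's splice fold computes fsplice
theorem fold_fsplice (base : String) (ins : List (Int × Int × String)) (parts : List String) (prev : Int) :
    (PySem.Str.join ""
      ((ins.foldl (fun (st : List String × Int) t =>
          (st.1 ++ [PySem.Str.slice base (some st.2) (some t.1), t.2.2], t.1)) (parts, prev)).1
        ++ [PySem.Str.slice base
              (some (ins.foldl (fun (st : List String × Int) t =>
                (st.1 ++ [PySem.Str.slice base (some st.2) (some t.1), t.2.2], t.1)) (parts, prev)).2) none])).toList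
    = (parts.map String.toList).flatten ++ fsplice base.toList prev (ins.map conv) := by
  induction ins generalizing parts prev with
  | nil =>
    simp only [List.foldl_nil, List.map_nil, fsplice, join_str_flatten, List.map_append,
      List.flatten_append, List.map_cons, List.flatten_cons, List.flatten_nil,
      PySem.Str.toList_slice, List.append_nil]
    rfl
  | cons e ins ih =>
    obtain ⟨p, r, t⟩ := e
    simp only [List.foldl_cons]
    rw [ih]
    simp only [List.map_append, List.flatten_append, List.map_cons, List.map_nil, fsplice, conv,
      List.flatten_cons, List.flatten_nil, PySem.Str.toList_slice, List.append_nil]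
    show (List.map String.toList parts).flatten ++
        (PySem.List.slice base.toList (some prev) (some p) ++ t.toList) ++
        fsplice base.toList p (List.map conv ins) = _
    simp [List.append_assoc]

-- fsplice is rsplice of the rebased list
theorem fsplice_rsplice (L : List (Int × Int × List Char)) (base : List Char) (prev : Int)
    (h0 : 0 ≤ prev) (hmem : ∀ e ∈ L, prev ≤ e.1) (hpw : L.Pairwise (fun a b => a.1 ≤ b.1)) :
    fsplice base prev L = rsplice (base.drop prev.toNat) (L.map (fun e => (e.1 - prev, e.2))) := by
  induction L generalizing prev with
  | nil => simp [fsplice, PySem.List.slice_from base h0, rsplice_nil]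
  | cons e L ih =>
    obtain ⟨p, r, t⟩ := e
    have hp : prev ≤ p := hmem (p, r, t) (by simp)
    have hps : ∀ e ∈ L, p ≤ e.1 := fun e he => (List.pairwise_cons.1 hpw).1 e he
    have htoNat : (p - prev).toNat = p.toNat - prev.toNat := by omega
    have hmm : (L.map (fun (e : Int × Int × List Char) => (e.1 - prev, e.2))).map
        (fun e => (e.1 - (p - prev), e.2)) = L.map (fun e => (e.1 - p, e.2)) := by
      rw [List.map_map]
      refine List.map_congr_left (fun e _ => by simp [Function.comp]; try ring)
    simp only [fsplice, List.map_cons, rsplice, htoNat, hmm, List.drop_drop]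
    rw [ih p (h0.trans hp) hps (List.pairwise_cons.1 hpw).2]
    have hd : prev.toNat + (p.toNat - prev.toNat) = p.toNat := by omega
    rw [PySem.List.slice_toNat base h0 (h0.trans hp), hd]

-- splicing the grouped insertions into the joined base yields the canonical row
theorem rsplice_ifzero (base : List Char) (c : Prop) [Decidable c] (r : Int) (t : List Char)
    (L : List (Int × Int × List Char)) :
    rsplice base ((if c then [((0 : Int), r, t)] else []) ++ L)
    = (if c then t else []) ++ rsplice base L := by
  split_ifs with h
  · exact rsplice_zero base r t L
  · simp

theorem mainSplice (ws : List (List Char)) (cb ce eb ee : Int) :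
    rsplice (PySem.Chars.join [' '] ws) ((gIns ws 0 cb ce eb ee).map conv) = canonF ws cb ce eb ee := by
  induction ws generalizing cb ce eb ee with
  | nil => simp [gIns, PySem.Chars.join_nil, canonF, rsplice]
  | cons w ws ih =>
    have hnn : ∀ e ∈ (gIns ws 0 (cb-1) (ce-1) (eb-1) (ee-1)).map conv, (0 : Int) ≤ e.1 := by
      intro e he
      obtain ⟨t, ht, rfl⟩ := List.mem_map.1 he
      exact (gIns_bound ws 0 (cb-1) (ce-1) (eb-1) (ee-1) t ht).1
    have hsplit : (gIns (w :: ws) 0 cb ce eb ee).map conv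
        = (if eb = 0 then [((0 : Int), (0 : Int), "<ARG1>".toList)] else [])
          ++ ((if cb = 0 then [((0 : Int), (1 : Int), "<ARG0>".toList)] else [])
          ++ (((if ce = 0 then [((0 : Int), (2 : Int), "</ARG0>".toList)] else [])
               ++ ((if ee = 0 then [((0 : Int), (3 : Int), "</ARG1>".toList)] else [])
               ++ ((gIns ws 0 (cb-1) (ce-1) (eb-1) (ee-1)).map conv).map
                    (fun (e : Int × Int × List Char) => (e.1 + 1, e.2)))).map
                (fun (e : Int × Int × List Char) => (e.1 + (w.length : Int), e.2)))) := by
      simp only [gIns]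
      rw [show (0 : Int) + (w.length : Int) + 1 = 0 + ((w.length : Int) + 1) by ring,
          gIns_shift ws 0 ((w.length : Int) + 1)]
      simp only [List.map_append, List.map_map, apply_ite (List.map conv),
        apply_ite (List.map (fun (e : Int × Int × List Char) => (e.1 + (w.length : Int), e.2))),
        List.map_cons, List.map_nil, List.append_assoc]
      refine congrArg₂ _ (by split_ifs <;> simp [conv]) ?_
      refine congrArg₂ _ (by split_ifs <;> simp [conv]) ?_
      refine congrArg₂ _ (by split_ifs <;> simp [conv]) ?_
      refine congrArg₂ _ (by split_ifs <;> simp [conv]) ?_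
      refine List.map_congr_left (fun e _ => ?_)
      simp [conv, Function.comp]
      ring
    rw [hsplit, rsplice_ifzero, rsplice_ifzero]
    have hif : ∀ (x : Int) (a : List Char),
        (if (0 : Int) = x then a else []) = (if x = 0 then a else []) := by
      intro x a
      rcases eq_or_ne x 0 with h | h
      · subst h; simp
      · rw [if_neg (Ne.symm h), if_neg h]
    have hpre : preC cb eb 0 = (if eb = 0 then "<ARG1>".toList else [])
        ++ (if cb = 0 then "<ARG0>".toList else []) := by
      unfold preC
      rw [hif, hif]
    have hsuf : sufC ce ee 0 = (if ce = 0 then "</ARG0>".toList else [])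
        ++ (if ee = 0 then "</ARG1>".toList else []) := by
      unfold sufC
      rw [hif, hif]
    have hin : ∀ e ∈ ((if ce = 0 then [((0 : Int), (2 : Int), "</ARG0>".toList)] else [])
              ++ ((if ee = 0 then [((0 : Int), (3 : Int), "</ARG1>".toList)] else [])
              ++ ((gIns ws 0 (cb-1) (ce-1) (eb-1) (ee-1)).map conv).map
                    (fun (e : Int × Int × List Char) => (e.1 + 1, e.2)))), (0 : Int) ≤ e.1 := by
      intro e he
      simp only [List.mem_append] at he
      rcases he with h | h | h
      · split at h <;> simp_all
      · split at h <;> simp_all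
      · obtain ⟨t, ht, rfl⟩ := List.mem_map.1 h
        have := hnn t ht
        simp
        omega
    cases ws with
    | nil =>
      have hbase : PySem.Chars.join [' '] [w] = w ++ [] := by
        simp [PySem.Chars.join_singleton]
      rw [hbase, rsplice_append w [] _ hin, rsplice_ifzero, rsplice_ifzero]
      simp only [gIns, List.map_nil, rsplice_nil, canonF, hpre, hsuf]
      simp
    | cons b m =>
      have hbase : PySem.Chars.join [' '] (w :: b :: m)
          = w ++ ([' '] ++ PySem.Chars.join [' '] (b :: m)) := by
        rw [PySem.Chars.join_cons_cons]
        simp [List.append_assoc]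
      rw [hbase, rsplice_append w _ _ hin, rsplice_ifzero, rsplice_ifzero]
      have hshift1 : ((gIns (b :: m) 0 (cb-1) (ce-1) (eb-1) (ee-1)).map conv).map
            (fun (e : Int × Int × List Char) => (e.1 + 1, e.2))
          = ((gIns (b :: m) 0 (cb-1) (ce-1) (eb-1) (ee-1)).map conv).map
            (fun (e : Int × Int × List Char) => (e.1 + (([' '] : List Char).length : Int), e.2)) := by
        simp
      rw [hshift1, rsplice_append [' '] _ _ hnn, ih]
      simp only [canonF, hpre, hsuf]
      simp

-- ===== VERDICT (by name: the statement is the Claim_ definition above) =====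
theorem tag_arg_spec : Claim_equal_tag_arg := by
  intro seq ti _
  unfold Spec_tag_arg tag_arg tag_arg_alt
  rw [PySem.List.foldl_append_singleton_eq_map, List.map_flatMap]
  simp only [List.nil_append]
  congr 1
  funext c
  rw [List.map_map]
  congr 1
  funext e
  simp only [Function.comp]
  -- per-pair row equality, proved on the char-list level
  refine String.toList_inj.mp ?_
  have hsep : (" " : String).toList = [' '] := by decide
  -- names
  rw [starts_foldl (PySem.Str.split₀ seq) [] 0]
  simp only [List.nil_append, PySem.List.len_eq]
  rw [ends_zip (PySem.Str.split₀ seq) 0]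
  -- identify the sorted insertion list
  have hperm := gIns_perm ((PySem.Str.split₀ seq).map String.toList) 0 c.1 c.2 e.1 e.2
  simp only [List.length_map] at hperm
  have hpw := (gIns_pairwise ((PySem.Str.split₀ seq).map String.toList) 0 c.1 c.2 e.1 e.2).imp
    (fun {a b} h => h.2)
  rw [PySem.List.sorted_eq_of_perm_of_pairwise_lt _ _ _ hperm hpw]
  -- B side: fold → fsplice → rsplice → canonical
  rw [fold_fsplice]
  have hnn : ∀ x ∈ (gIns ((PySem.Str.split₀ seq).map String.toList) 0 c.1 c.2 e.1 e.2).map conv,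
      (0 : Int) ≤ x.1 := by
    intro x hx
    obtain ⟨t, ht, rfl⟩ := List.mem_map.1 hx
    exact (gIns_bound _ _ _ _ _ _ t ht).1
  have hpw2 : ((gIns ((PySem.Str.split₀ seq).map String.toList) 0 c.1 c.2 e.1 e.2).map conv).Pairwise
      (fun a b => a.1 ≤ b.1) := by
    refine (List.pairwise_map.2 ?_)
    exact (gIns_pairwise ((PySem.Str.split₀ seq).map String.toList) 0 c.1 c.2 e.1 e.2).imp
      (fun {a b} h => h.1)
  rw [fsplice_rsplice _ _ 0 le_rfl hnn hpw2]
  simp only [Int.toNat_zero, List.drop_zero, sub_zero, List.map_nil, List.flatten_nil,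
    List.nil_append]
  have hid : ((gIns ((PySem.Str.split₀ seq).map String.toList) 0 c.1 c.2 e.1 e.2).map conv).map
      (fun e => (e.1, e.2)) = (gIns ((PySem.Str.split₀ seq).map String.toList) 0 c.1 c.2 e.1 e.2).map conv := by
    simp
  rw [hid]
  have hbase : (PySem.Str.join " " (PySem.Str.split₀ seq)).toList
      = PySem.Chars.join [' '] ((PySem.Str.split₀ seq).map String.toList) := by
    rw [PySem.Str.toList_join, hsep]
  rw [hbase, mainSplice]
  -- A side: map → canonical
  rw [PySem.List.foldl_append_singleton_eq_map]
  simp only [List.nil_append]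
  rw [PySem.Str.toList_join, hsep, List.map_map]
  have hrow : ∀ i ∈ List.range (PySem.Str.split₀ seq).length,
      (String.toList ∘ fun i =>
        (let term := (PySem.Str.split₀ seq).getD i ""
         let term := if (i : Int) = c.1 then "<ARG0>" ++ term else term
         let term := if (i : Int) = c.2 then term ++ "</ARG0>" else term
         let term := if (i : Int) = e.1 then "<ARG1>" ++ term else term
         let term := if (i : Int) = e.2 then term ++ "</ARG1>" else term
         term)) i
      = preC c.1 e.1 (i : Int) ++ ((PySem.Str.split₀ seq).map String.toList).getD i []
        ++ sufC c.2 e.2 (i : Int) := by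
    intro i _
    show (let term := (PySem.Str.split₀ seq).getD i ""
          let term := if (i : Int) = c.1 then "<ARG0>" ++ term else term
          let term := if (i : Int) = c.2 then term ++ "</ARG0>" else term
          let term := if (i : Int) = e.1 then "<ARG1>" ++ term else term
          let term := if (i : Int) = e.2 then term ++ "</ARG1>" else term
          term).toList = _
    rw [termA_toList, getD_map_str]
  rw [List.map_congr_left hrow]
  have hlen : (PySem.Str.split₀ seq).length = ((PySem.Str.split₀ seq).map String.toList).length := by
    rw [List.length_map]
  rw [hlen, rowL_eq, joinCanon]
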